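-- pv_equiv track=rewrite | github.com/ideepankarsharma2003/SD1-coding | L2. Big O/code.py | count_pairs_which_sum_to_max
-- ===== SOURCE A (Python) =====
-- def count_pairs_which_sum_to_max(array):
--     max_value= max(array)
--     count=0
--
--     for left in range(0, len(array)):
--         for right in range(left+1, len(array)):
--             left_value= array[left]
--             right_value= array[right]
--             if left_value+right_value==max_value:
--                 count+=1
--     return count
-- ===== SOURCE B (Python) =====
-- def count_pairs_which_sum_to_max(array):
--     max_value = max(array)
--     seen = {}
--     count = 0
--     for x in array:
--         count += seen.get(max_value - x, 0)
--         seen[x] = seen.get(x, 0) + 1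
--     return count
-- ===== Notes on version B (the rewrite author's own statement) =====
-- stated objective: faster
-- what changed: replaced the O(n^2) nested index loops with a single pass that, for each element, adds the count of previously seen complements (max_value - x) kept in a dict
-- outside the precondition, e.g. on count_pairs_which_sum_to_max([]): A raises ValueError, B raises ValueError
import Mathlib
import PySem

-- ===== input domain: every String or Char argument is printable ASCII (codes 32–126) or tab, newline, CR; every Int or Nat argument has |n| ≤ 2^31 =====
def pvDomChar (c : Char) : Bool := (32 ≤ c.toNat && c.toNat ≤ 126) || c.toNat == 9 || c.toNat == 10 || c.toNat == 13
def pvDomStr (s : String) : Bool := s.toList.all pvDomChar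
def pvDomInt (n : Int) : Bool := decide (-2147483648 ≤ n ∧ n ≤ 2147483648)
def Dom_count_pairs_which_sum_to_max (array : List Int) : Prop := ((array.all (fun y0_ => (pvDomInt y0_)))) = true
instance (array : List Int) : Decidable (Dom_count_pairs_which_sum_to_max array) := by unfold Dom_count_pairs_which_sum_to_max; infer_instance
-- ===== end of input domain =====

-- B replaces A's nested index loops by one pass that, per element, adds the count of
-- previously seen complements kept in a dict (objective: faster).

-- ===== PORT A =====
def count_pairs_which_sum_to_max (array : List Int) : Int :=
  match PySem.List.max? array (fun x => x) with
  | none => 0   -- Python raises ValueError here; excluded by Pre_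
  | some max_value =>
    (PySem.List.pyRange 0 array.length 1).foldl (fun count left =>
      (PySem.List.pyRange (left + 1) array.length 1).foldl (fun count right =>
        let left_value := PySem.List.pyGetD array left 0
        let right_value := PySem.List.pyGetD array right 0
        if left_value + right_value == max_value then count + 1 else count) count) 0

-- ===== PORT B =====
def count_pairs_which_sum_to_max_alt (array : List Int) : Int :=
  match PySem.List.max? array (fun x => x) with
  | none => 0   -- Python raises ValueError here; excluded by Pre_
  | some max_value =>
    (array.foldl (fun (s : PySem.Dict Int Int × Int) x =>
        let count := s.2 + s.1.getD (max_value - x) 0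
        (s.1.insert x (s.1.getD x 0 + 1), count))
      (PySem.Dict.empty, 0)).2

-- ===== PRECONDITION & SPEC =====
-- Python's max([]) raises ValueError (in A and in B alike): the empty list is excluded.
def Pre_count_pairs_which_sum_to_max (array : List Int) : Prop := array ≠ []
instance (array : List Int) : Decidable (Pre_count_pairs_which_sum_to_max array) := by unfold Pre_count_pairs_which_sum_to_max; infer_instance
def pvWitness_count_pairs_which_sum_to_max : List Int := [1, 2, 3]
def Spec_count_pairs_which_sum_to_max (array : List Int) (out : Int) : Prop := out = count_pairs_which_sum_to_max_alt array
instance (array : List Int) (out : Int) : Decidable (Spec_count_pairs_which_sum_to_max array out) := by unfold Spec_count_pairs_which_sum_to_max; infer_instance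

-- ===== CLAIM (what is proved, stated in full; the proofs are below) =====
def Claim_equal_count_pairs_which_sum_to_max : Prop := ∀ (array : List Int), Dom_count_pairs_which_sum_to_max array → Pre_count_pairs_which_sum_to_max array → Spec_count_pairs_which_sum_to_max array (count_pairs_which_sum_to_max array)

-- ===== LEMMAS AND PROOFS =====

-- number of pairs i < j with l[i] + l[j] = m, by head decomposition
def pvPairs (m : Int) : List Int → Nat
  | [] => 0
  | x :: xs => xs.count (m - x) + pvPairs m xs

theorem pvMapSum_append (m x : Int) (pre xs : List Int) :
    (xs.map (fun y => (((pre ++ [x]).count (m - y) : Nat) : Int))).sum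
      = (xs.map (fun y => ((pre.count (m - y) : Nat) : Int))).sum + (xs.count (m - x) : Int) := by
  induction xs with
  | nil => simp
  | cons y ys ihy =>
    rw [List.map_cons, List.map_cons, List.sum_cons, List.sum_cons, ihy, List.count_append]
    push_cast [List.count_cons]
    by_cases hy : y = m - x
    · have e1 : (x == m - y) = true := beq_iff_eq.mpr (by omega)
      have e2 : (y == m - x) = true := beq_iff_eq.mpr hy
      simp [e1, e2]; ring
    · have e1 : (x == m - y) = false := beq_eq_false_iff_ne.mpr (by omega)
      have e2 : (y == m - x) = false := beq_eq_false_iff_ne.mpr hy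
      simp [e1, e2]; ring

-- B's loop invariant: the dict is the multiset of the processed prefix, the counter the pairs so far
theorem pvB_inv (m : Int) (l : List Int) : ∀ (d : PySem.Dict Int Int) (c : Int) (pre : List Int),
    (∀ v, d.getD v 0 = (pre.count v : Int)) →
    (l.foldl (fun (s : PySem.Dict Int Int × Int) x =>
        let count := s.2 + s.1.getD (m - x) 0
        (s.1.insert x (s.1.getD x 0 + 1), count)) (d, c)).2
      = c + (l.map (fun x => (pre.count (m - x) : Int))).sum + (pvPairs m l : Int) := by
  induction l with
  | nil => intro d c pre h; simp [pvPairs]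
  | cons x xs ih =>
    intro d c pre h
    rw [List.foldl_cons]
    have h' : ∀ v, (d.insert x (d.getD x 0 + 1)).getD v 0 = (((pre ++ [x]).count v : Nat) : Int) := by
      intro v
      rw [PySem.Dict.getD_insert]
      by_cases hv : v = x
      · simp [hv, h, List.count_append]
      · simp [hv, h, List.count_append, Ne.symm hv]
    rw [ih (d.insert x (d.getD x 0 + 1)) (c + d.getD (m - x) 0) (pre ++ [x]) h']
    rw [pvMapSum_append, h]
    simp only [List.map_cons, List.sum_cons, pvPairs]
    push_cast
    ring

theorem pvCountP_eq_count (lv m : Int) (xs : List Int) :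
    xs.countP (fun y => lv + y == m) = xs.count (m - lv) := by
  induction xs with
  | nil => rfl
  | cons y ys ih =>
    rw [List.countP_cons, List.count_cons, ih]
    by_cases hy : y = m - lv
    · have e1 : (lv + y == m) = true := beq_iff_eq.mpr (by omega)
      have e2 : (y == m - lv) = true := beq_iff_eq.mpr hy
      simp [e1, e2]
    · have e1 : (lv + y == m) = false := beq_eq_false_iff_ne.mpr (by omega)
      have e2 : (y == m - lv) = false := beq_eq_false_iff_ne.mpr hy
      simp [e1, e2]

theorem pvSum_eq_pairs (m : Int) (array : List Int) :
    ((List.range array.length).map (fun k => (((array.drop (k + 1)).count (m - array.getD k 0) : Nat) : Int))).sum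
      = (pvPairs m array : Int) := by
  induction array with
  | nil => simp [pvPairs]
  | cons x xs ih =>
    rw [List.length_cons, List.range_succ_eq_map]
    simp only [List.map_cons, List.map_map, List.sum_cons]
    have h2 : ((List.range xs.length).map ((fun k => ((((x :: xs).drop (k + 1)).count (m - (x :: xs).getD k 0) : Nat) : Int)) ∘ Nat.succ))
        = (List.range xs.length).map (fun k => (((xs.drop (k + 1)).count (m - xs.getD k 0) : Nat) : Int)) := by
      apply List.map_congr_left
      intro k _
      simp [Function.comp, List.drop_succ_cons]
    rw [h2, ih]
    simp [pvPairs]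

theorem pvA_eq_pairs (array : List Int) (m : Int) :
    (PySem.List.pyRange 0 array.length 1).foldl (fun count left =>
      (PySem.List.pyRange (left + 1) array.length 1).foldl (fun count right =>
        let left_value := PySem.List.pyGetD array left 0
        let right_value := PySem.List.pyGetD array right 0
        if left_value + right_value == m then count + 1 else count) count) 0
    = (pvPairs m array : Int) := by
  have hstep : ∀ (c left : Int), left ∈ PySem.List.pyRange 0 array.length 1 →
      (PySem.List.pyRange (left + 1) array.length 1).foldl (fun count right =>
        let left_value := PySem.List.pyGetD array left 0
        let right_value := PySem.List.pyGetD array right 0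
        if left_value + right_value == m then count + 1 else count) c
      = c + (((array.drop (left + 1).toNat).count (m - PySem.List.pyGetD array left 0) : Nat) : Int) := by
    intro c left hl
    have h0 : (0:Int) ≤ left + 1 := by
      have := (PySem.List.mem_pyRange_one).mp hl; omega
    dsimp only
    rw [PySem.List.foldl_pyRange_pyGetD' array 0
        (fun acc y => if PySem.List.pyGetD array left 0 + y == m then acc + 1 else acc) c h0]
    rw [PySem.List.foldl_if_add_one, pvCountP_eq_count]
  rw [PySem.List.foldl_congr_mem
    (f := fun (count left : Int) => (PySem.List.pyRange (left + 1) array.length 1).foldl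
        (fun count right =>
          let left_value := PySem.List.pyGetD array left 0
          let right_value := PySem.List.pyGetD array right 0
          if left_value + right_value == m then count + 1 else count) count)
    (g := fun (c left : Int) => c + (((array.drop (left + 1).toNat).count (m - PySem.List.pyGetD array left 0) : Nat) : Int))
    (init := (0:Int)) (l := PySem.List.pyRange 0 (array.length : Int) 1) hstep]
  rw [PySem.List.foldl_add]
  rw [PySem.List.pyRange_zero_nat, List.map_map, zero_add]
  have hm : ∀ k ∈ List.range array.length,
      ((fun left => (((array.drop (left + 1).toNat).count (m - PySem.List.pyGetD array left 0) : Nat) : Int)) ∘ (fun k : Nat => (k : Int))) k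
        = (fun k : Nat => (((array.drop (k + 1)).count (m - array.getD k 0) : Nat) : Int)) k := by
    intro k _
    have h1 : ((k : Int) + 1).toNat = k + 1 := by omega
    simp [Function.comp, h1]
  rw [List.map_congr_left hm, pvSum_eq_pairs]

-- ===== VERDICT (by name: the statement is the Claim_ definition above) =====
theorem count_pairs_which_sum_to_max_spec : Claim_equal_count_pairs_which_sum_to_max := by
  intro array _ _
  unfold Spec_count_pairs_which_sum_to_max count_pairs_which_sum_to_max count_pairs_which_sum_to_max_alt
  cases h : PySem.List.max? array (fun x => x) with
  | none => rfl
  | some m =>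
    dsimp only
    rw [pvA_eq_pairs]
    rw [pvB_inv m array PySem.Dict.empty 0 [] (by intro v; simp [PySem.Dict.getD_empty])]
    simp
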